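-- pv_equiv track=rewrite | github.com/gavinkflam/aoc | aoc2025/solutions/star12.py | read_operands
-- ===== SOURCE A (Python) =====
-- def read_operands(worksheet: list[str], left: int, right: int) -> list[int]:
--     """Read the operands of the current formula from right-to-left and top-to-bottom."""
--     rows = len(worksheet)
--     operands = []
--
--     for col in range(right, left - 1, -1):
--         operand = 0
--
--         for row in range(0, rows - 1):
--             if worksheet[row][col] != " ":
--                 operand = operand * 10 + int(worksheet[row][col])
--
--         operands.append(operand)
--
--     return operands
-- ===== SOURCE B (Python) =====
-- def read_operands(worksheet: list[str], left: int, right: int) -> list[int]: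
--     """Read the operands of the current formula from right-to-left and top-to-bottom."""
--     acc = [0] * (right - left + 1)
--     for row in worksheet[:-1]:
--         acc = [a if row[right - k] == " " else a * 10 + int(row[right - k])
--                for k, a in enumerate(acc)]
--     return acc
-- ===== Notes on version B (the rewrite author's own statement) =====
-- stated objective: alternative
-- what changed: B interchanges the loops: instead of A's column-major nested scan (for each column, an inner Horner loop over the rows), B makes a single row-major pass over worksheet[:-1], maintaining a vector of per-column accumulators that it rebuilds with one comprehension per row.
import Mathlib
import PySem

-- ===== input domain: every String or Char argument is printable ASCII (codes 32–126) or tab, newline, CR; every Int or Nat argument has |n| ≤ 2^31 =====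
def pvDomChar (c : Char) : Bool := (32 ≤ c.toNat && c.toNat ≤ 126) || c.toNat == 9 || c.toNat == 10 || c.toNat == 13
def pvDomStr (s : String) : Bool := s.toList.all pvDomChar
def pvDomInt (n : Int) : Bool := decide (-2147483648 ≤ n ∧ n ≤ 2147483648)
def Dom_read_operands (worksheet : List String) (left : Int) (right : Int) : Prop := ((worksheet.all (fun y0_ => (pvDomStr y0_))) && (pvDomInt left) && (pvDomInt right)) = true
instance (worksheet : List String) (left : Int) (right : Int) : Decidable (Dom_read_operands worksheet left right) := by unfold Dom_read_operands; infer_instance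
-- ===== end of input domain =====

-- B interchanges A's loops: one row-major pass over worksheet[:-1] maintaining per-column
-- accumulators, instead of A's column-major nested Horner loops (objective: alternative).

-- int(ch) for a single character: exact whenever ch is an ASCII digit (Pre_ admits only
-- digits and spaces, and the branch guarding this call excludes the space)
def pyDigit (c : Char) : Int := (c.toNat : Int) - 48

-- ===== PORT A =====
def read_operands (worksheet : List String) (left : Int) (right : Int) : List Int :=
  let rows : Int := worksheet.length
  (PySem.List.pyRange right (left - 1) (-1)).foldl (fun operands col =>
    let operand : Int := (PySem.List.pyRange 0 (rows - 1)).foldl (fun operand row =>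
      -- worksheet[row][col] (written twice, as in A): row always in range; char access in range under Pre_
      if (PySem.Str.pyGet? (PySem.List.pyGetD worksheet row "") col).getD ' ' ≠ ' '
      then operand * 10 + pyDigit ((PySem.Str.pyGet? (PySem.List.pyGetD worksheet row "") col).getD ' ')
      else operand) 0
    operands ++ [operand]) []

-- ===== PORT B =====
def read_operands_alt (worksheet : List String) (left : Int) (right : Int) : List Int :=
  -- acc = [0] * (right - left + 1)
  let acc0 : List Int := List.replicate (right - left + 1).toNat 0
  -- for row in worksheet[:-1]: acc = [a if row[right-k] == " " else a*10 + int(row[right-k]) for k, a in enumerate(acc)]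
  (PySem.List.slice worksheet none (some (-1))).foldl (fun acc row =>
    (PySem.List.enumerate acc).map (fun p =>
      if (PySem.Str.pyGet? row (right - p.1)).getD ' ' = ' ' then p.2
      else p.2 * 10 + pyDigit ((PySem.Str.pyGet? row (right - p.1)).getD ' '))) acc0

-- ===== PRECONDITION & SPEC =====
-- exactly the inputs where the Python returns: every accessed cell worksheet[row][col]
-- (rows 0..rows-2, cols right down to left, Python negative indexing included) exists and
-- holds a space or an ASCII digit (otherwise IndexError / ValueError from int); stated per
-- character position so it is decidable without materialising the column range
def Pre_read_operands (worksheet : List String) (left : Int) (right : Int) : Prop :=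
  ∀ row ∈ worksheet.dropLast,
    (left ≤ right → -(PySem.Str.len row) ≤ left ∧ right < PySem.Str.len row) ∧
    ∀ p ∈ PySem.List.enumerate row.toList,
      ((left ≤ p.1 ∧ p.1 ≤ right) ∨ (left ≤ p.1 - PySem.Str.len row ∧ p.1 - PySem.Str.len row ≤ right)) →
      (p.2 == ' ' || p.2.isDigit) = true
instance (worksheet : List String) (left : Int) (right : Int) : Decidable (Pre_read_operands worksheet left right) := by unfold Pre_read_operands; infer_instance

def pvWitness_read_operands : List String × Int × Int := (["12", "34", "++"], 0, 1)

def Spec_read_operands (worksheet : List String) (left : Int) (right : Int) (out : List Int) : Prop := out = read_operands_alt worksheet left right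
instance (worksheet : List String) (left : Int) (right : Int) (out : List Int) : Decidable (Spec_read_operands worksheet left right out) := by unfold Spec_read_operands; infer_instance

-- ===== CLAIM (what is proved, stated in full; the proofs are below) =====
def Claim_equal_read_operands : Prop := ∀ (worksheet : List String) (left : Int) (right : Int), Dom_read_operands worksheet left right → Pre_read_operands worksheet left right → Spec_read_operands worksheet left right (read_operands worksheet left right)

-- ===== LEMMAS AND PROOFS =====

-- the one-column update both programs perform on an accumulator
def pvStep (right : Int) (k : Int) (a : Int) (row : String) : Int :=
  if (PySem.Str.pyGet? row (right - k)).getD ' ' = ' ' then a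
  else a * 10 + pyDigit ((PySem.Str.pyGet? row (right - k)).getD ' ')

-- the row range of A's inner loop is exactly the index range of worksheet.dropLast
theorem rowRange_eq (worksheet : List String) :
    PySem.List.pyRange 0 ((worksheet.length : Int) - 1)
      = PySem.List.pyRange 0 (PySem.List.len worksheet.dropLast) := by
  cases worksheet with
  | nil => rfl
  | cons h t => simp [PySem.List.len, List.length_dropLast]

-- A's inner loop reads worksheet[row]; over that range this is (worksheet.dropLast)[row]
theorem pyGetD_dropLast (worksheet : List String) (j : Int)
    (hj : j ∈ PySem.List.pyRange 0 (PySem.List.len worksheet.dropLast)) :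
    PySem.List.pyGetD worksheet j "" = PySem.List.pyGetD worksheet.dropLast j "" := by
  rw [PySem.List.mem_pyRange_one] at hj
  obtain ⟨h0, hlt⟩ := hj
  have hlt' : j.toNat < worksheet.dropLast.length := by
    simp only [PySem.List.len] at hlt; omega
  have hlt'' : j.toNat < worksheet.length := by
    have := worksheet.length_dropLast; omega
  rw [PySem.List.pyGetD_of_nonneg _ _ h0, PySem.List.pyGetD_of_nonneg _ _ h0]
  rw [List.getD_eq_getElem _ _ hlt'', List.getD_eq_getElem _ _ hlt']
  exact (List.getElem_dropLast hlt').symm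

-- A's per-column inner loop is a fold of pvStep over the body rows
theorem colA_eq (worksheet : List String) (right k : Int) :
    (PySem.List.pyRange 0 ((worksheet.length : Int) - 1)).foldl (fun operand row =>
        if (PySem.Str.pyGet? (PySem.List.pyGetD worksheet row "") (right - k)).getD ' ' ≠ ' '
        then operand * 10 + pyDigit ((PySem.Str.pyGet? (PySem.List.pyGetD worksheet row "") (right - k)).getD ' ')
        else operand) 0
      = worksheet.dropLast.foldl (fun a row => pvStep right k a row) 0 := by
  rw [rowRange_eq]
  have hcongr :
      (PySem.List.pyRange 0 (PySem.List.len worksheet.dropLast)).foldl (fun operand row =>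
        if (PySem.Str.pyGet? (PySem.List.pyGetD worksheet row "") (right - k)).getD ' ' ≠ ' '
        then operand * 10 + pyDigit ((PySem.Str.pyGet? (PySem.List.pyGetD worksheet row "") (right - k)).getD ' ')
        else operand) 0
      = (PySem.List.pyRange 0 (PySem.List.len worksheet.dropLast)).foldl (fun operand row =>
        if (PySem.Str.pyGet? (PySem.List.pyGetD worksheet.dropLast row "") (right - k)).getD ' ' ≠ ' '
        then operand * 10 + pyDigit ((PySem.Str.pyGet? (PySem.List.pyGetD worksheet.dropLast row "") (right - k)).getD ' ')
        else operand) 0 :=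
    PySem.List.foldl_congr_mem _ _ _ _ (fun acc x hx => by rw [pyGetD_dropLast worksheet x hx])
  rw [hcongr]
  rw [PySem.List.foldl_pyRange_pyGetD worksheet.dropLast ""
      (fun operand r =>
        if (PySem.Str.pyGet? r (right - k)).getD ' ' ≠ ' '
        then operand * 10 + pyDigit ((PySem.Str.pyGet? r (right - k)).getD ' ')
        else operand) 0 le_rfl]
  simp only [Int.toNat_zero, List.drop_zero]
  exact PySem.List.foldl_congr_mem _ _ _ _ (fun a r _ => by
    simp only [pvStep, ne_eq, ite_not])

-- one B row-update on an accumulator of the form (range n).map g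
theorem row_update_map (right : Int) (row : String) (g : Nat → Int) (n : Nat) :
    (PySem.List.enumerate ((List.range n).map (fun k => g k))).map (fun p =>
        if (PySem.Str.pyGet? row (right - p.1)).getD ' ' = ' ' then p.2
        else p.2 * 10 + pyDigit ((PySem.Str.pyGet? row (right - p.1)).getD ' '))
      = (List.range n).map (fun k => pvStep right (Int.ofNat k) (g k) row) := by
  induction n with
  | zero => simp [PySem.List.enumerate_nil]
  | succ m ih =>
    rw [List.range_succ, List.map_append, PySem.List.enumerate_append, List.map_append, ih]
    simp [PySem.List.enumerate_cons, PySem.List.enumerate_nil, pvStep]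

-- B's whole loop, with the accumulator generalised to (range n).map g
theorem B_loop (right : Int) (rs : List String) (g : Nat → Int) (n : Nat) :
    rs.foldl (fun acc row =>
        (PySem.List.enumerate acc).map (fun p =>
          if (PySem.Str.pyGet? row (right - p.1)).getD ' ' = ' ' then p.2
          else p.2 * 10 + pyDigit ((PySem.Str.pyGet? row (right - p.1)).getD ' ')))
      ((List.range n).map (fun k => g k))
      = (List.range n).map (fun k => rs.foldl (fun a row => pvStep right (Int.ofNat k) a row) (g k)) := by
  induction rs generalizing g with
  | nil => rfl
  | cons r rs ih =>
    rw [List.foldl_cons, row_update_map, ih (fun k => pvStep right (Int.ofNat k) (g k) r)]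
    simp

-- ===== VERDICT (by name: the statement is the Claim_ definition above) =====
theorem read_operands_spec : Claim_equal_read_operands := by
  intro worksheet left right _ _
  unfold Spec_read_operands read_operands read_operands_alt
  simp only [PySem.List.foldl_append_singleton_eq_map, List.nil_append,
    PySem.List.slice_to_neg_one]
  rw [PySem.List.pyRange_neg_one]
  have hn : (right - (left - 1)).toNat = (right - left + 1).toNat := by omega
  rw [hn]
  have hrep : List.replicate (right - left + 1).toNat (0 : Int)
      = (List.range (right - left + 1).toNat).map (fun _ => (0 : Int)) := by
    simp
  rw [hrep, B_loop right worksheet.dropLast (fun _ => 0) (right - left + 1).toNat,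
      List.map_map]
  refine List.map_congr_left (fun k _ => ?_)
  simpa using colA_eq worksheet right (Int.ofNat k)
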